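-- pv_equiv track=rewrite | github.com/DlabrecquePE/project-euler | src/Problem 145.py | is_reversible
-- ===== SOURCE A (Python) =====
-- def is_reversible(num):
--     reverse = str(num)[::-1]
--     if reverse[0] == '0':
--         return False
--     test_array = [int(char) for char in str(num + int(reverse))]
--     for number in test_array:
--         if number in [0, 2, 4, 6, 8]:
--             return False
--     return True
-- ===== SOURCE B (Python) =====
-- def is_reversible(num):
--     if num % 10 == 0:
--         return False
--     r, t = 0, num
--     while t > 0:
--         r = r * 10 + t % 10
--         t //= 10
--     total = num + r
--     while total > 0:
--         if (total % 10) % 2 == 0: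
--             return False
--         total //= 10
--     return True
-- ===== Notes on version B (the rewrite author's own statement) =====
-- stated objective: alternative
-- what changed: B drops the string machinery entirely: instead of reversing str(num), parsing it back with int(), and scanning a list of int(char) digits for even members, it reverses the number and tests digit oddness purely arithmetically with modulus/floor-division loops.
import Mathlib
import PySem

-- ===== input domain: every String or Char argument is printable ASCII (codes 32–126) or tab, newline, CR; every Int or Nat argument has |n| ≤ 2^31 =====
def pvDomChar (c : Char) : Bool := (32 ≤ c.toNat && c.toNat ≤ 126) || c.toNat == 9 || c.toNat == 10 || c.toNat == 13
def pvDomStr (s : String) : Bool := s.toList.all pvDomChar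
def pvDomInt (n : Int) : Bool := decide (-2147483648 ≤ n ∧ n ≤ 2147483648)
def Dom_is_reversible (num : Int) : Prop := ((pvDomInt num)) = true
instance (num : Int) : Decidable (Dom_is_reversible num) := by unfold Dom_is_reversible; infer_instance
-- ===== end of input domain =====

-- B replaces A's string reversal, int() parse and digit-list scan by pure integer
-- arithmetic (% 10 and // 10 loops); equal on Pre_ (where Python A returns).

-- ===== PORT A =====
-- the `for number in test_array: if number in [0,2,4,6,8]: return False` loop
def pvScanA : List Int → Bool
  | [] => true
  | x :: rest => if x ∈ ([0, 2, 4, 6, 8] : List Int) then false else pvScanA rest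

def is_reversible (num : Int) : Bool :=
  -- reverse = str(num)[::-1]; slice? with step -1 is never none, getD [] is unreachable
  let reverse := (PySem.List.slice? (PySem.Int.toChars num) none none (-1)).getD []
  -- if reverse[0] == '0': return False   (reverse is never empty, so no IndexError)
  if PySem.List.pyGet? reverse 0 = some '0' then false
  else
    -- int(reverse); none = ValueError, which Pre_ excludes (value here is arbitrary)
    match PySem.Int.ofChars? reverse with
    | none => false
    | some r =>
        -- test_array = [int(char) for char in str(num + int(reverse))]
        -- int(char) never raises on the chars reached inside Pre_, so getD 0 is unreachable
        pvScanA ((PySem.Int.toChars (num + r)).map (fun c => (PySem.Int.ofChars? [c]).getD 0))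

-- ===== PORT B =====
-- while t > 0: r = r*10 + t%10; t //= 10   (fuel = initial t.toNat bounds the iterations)
def pvRevLoop : Nat → Int → Int → Int
  | 0, _, r => r
  | fuel + 1, t, r =>
    if 0 < t then pvRevLoop fuel (PySem.Int.floordiv t 10) (r * 10 + PySem.Int.mod t 10) else r

-- while total > 0: if (total%10)%2 == 0: return False; total //= 10
def pvOddLoop : Nat → Int → Bool
  | 0, _ => true
  | fuel + 1, t =>
    if 0 < t then
      if PySem.Int.mod (PySem.Int.mod t 10) 2 = 0 then false
      else pvOddLoop fuel (PySem.Int.floordiv t 10)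
    else true

def is_reversible_alt (num : Int) : Bool :=
  if PySem.Int.mod num 10 = 0 then false
  else
    let r := pvRevLoop num.toNat num 0
    let total := num + r
    pvOddLoop total.toNat total

-- ===== PRECONDITION & SPEC =====
-- A raises ValueError (int of the reversed "…-" string) exactly on the negative inputs
-- whose last decimal digit is nonzero; negatives ending in the digit zero are rejected
-- by A before parsing and stay inside Pre_.
def Pre_is_reversible (num : Int) : Prop := 0 ≤ num ∨ (10 : Int) ∣ num
instance (num : Int) : Decidable (Pre_is_reversible num) := by unfold Pre_is_reversible; infer_instance

def pvWitness_is_reversible : Int := 36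

def Spec_is_reversible (num : Int) (out : Bool) : Prop := out = is_reversible_alt num
instance (num : Int) (out : Bool) : Decidable (Spec_is_reversible num out) := by unfold Spec_is_reversible; infer_instance

-- ===== CLAIM (what is proved, stated in full; the proofs are below) =====
def Claim_equal_is_reversible : Prop := ∀ (num : Int), Dom_is_reversible num → Pre_is_reversible num → Spec_is_reversible num (is_reversible num)

-- ===== LEMMAS AND PROOFS =====

-- `Option.map (fun n : Int => n) ∘ bind` shape of PySem.Int.ofChars?'s result
theorem pvBindShape (o : Option Nat) (v : Nat) (h : o = some v) :
    Option.map (fun n : Int => n) (Bind.bind o (fun a : Nat => Pure.pure (a : Int))) = some (v : Int) := by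
  subst h; rfl

theorem pvNotSpace (x : Nat) (h : x < 10) : PySem.Int.isIntSpace (Nat.digitChar x) = false := by
  interval_cases x <;> decide

-- int()'s whitespace stripping is the identity on space-free strings
theorem pvStripId (cs : List Char) (h : ∀ c ∈ cs, PySem.Int.isIntSpace c = false) :
    (List.dropWhile PySem.Int.isIntSpace (List.dropWhile PySem.Int.isIntSpace cs).reverse).reverse = cs := by
  have h2 : ∀ c ∈ (List.dropWhile PySem.Int.isIntSpace cs).reverse, PySem.Int.isIntSpace c = false := by
    intro c hc
    exact h c ((List.dropWhile_sublist _).mem (List.mem_reverse.1 hc))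
  rw [List.dropWhile_eq_self_iff.2, List.dropWhile_eq_self_iff.2, List.reverse_reverse]
  · intro hl; simp [h _ (List.getElem_mem hl)]
  · intro hl
    have hm : (List.dropWhile PySem.Int.isIntSpace cs).reverse[0]'hl ∈ cs := by
      exact (List.dropWhile_sublist _).mem (List.mem_reverse.1 (List.getElem_mem hl))
    simpa using h _ hm

-- abstract digit-accumulator loop (instantiated with int()'s internal scanner by unification)
theorem pvGoKey (g : List Char → Bool → Nat → Option Nat)
    (hcons : ∀ (d : Nat) (cs : List Char) (b : Bool) (a : Nat), d < 10 →
      g (Nat.digitChar d :: cs) b a = g cs true (a * 10 + d))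
    (hnil : ∀ a : Nat, g [] true a = some a) :
    ∀ (L : List Nat) (a : Nat), (∀ x ∈ L, x < 10) →
      g (L.map Nat.digitChar) true a = some (L.foldl (fun x y => x * 10 + y) a) := by
  intro L
  induction L with
  | nil => intro a _; simpa using hnil a
  | cons d L' ih =>
    intro a hd
    rw [List.map_cons, hcons d _ _ _ (hd d (by simp)), List.foldl_cons]
    exact ih _ (fun x hx => hd x (by simp [hx]))

-- int(s) on a nonempty pure-digit string returns its decimal value
theorem pvOfCharsDigits (d : Nat) (L : List Nat) (hd : d < 10) (hL : ∀ x ∈ L, x < 10) :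
    PySem.Int.ofChars? ((d :: L).map Nat.digitChar)
      = some (((d :: L).foldl (fun x y => x * 10 + y) 0 : Nat) : Int) := by
  unfold PySem.Int.ofChars?
  rw [pvStripId _ (by rintro c hc
                      simp only [List.map_cons, List.mem_cons, List.mem_map] at hc
                      rcases hc with rfl | ⟨x, hx, rfl⟩
                      exacts [pvNotSpace d hd, pvNotSpace x (hL x hx)])]
  simp only [List.map_cons, List.foldl_cons, Nat.zero_mul, Nat.zero_add]
  interval_cases d <;> refine pvBindShape _ _ ?_ <;>
    exact pvGoKey _ (fun e cs b a he => by interval_cases e <;> rfl) (fun a => rfl) L _ hL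

-- str(n)'s digit list, most significant first
def pvDigitsMSB (n : Nat) : List Nat := if n = 0 then [0] else (Nat.digits 10 n).reverse

theorem pvToDigitsCoreEq (f : Nat) : ∀ (n : Nat) (l : List Char), n < f →
    Nat.toDigitsCore 10 f n l = (pvDigitsMSB n).map Nat.digitChar ++ l := by
  induction f with
  | zero => intro n l h; omega
  | succ f ih =>
    intro n l h
    by_cases h0 : n / 10 = 0
    · have h10 : n < 10 := by omega
      simp only [Nat.toDigitsCore, h0, if_pos]
      by_cases hn : n = 0
      · subst hn; simp [pvDigitsMSB]
      · rw [pvDigitsMSB, if_neg hn, Nat.digits_def' (b := 10) (by norm_num) (Nat.pos_of_ne_zero hn), h0]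
        simp [Nat.mod_eq_of_lt h10]
    · have hn : n ≠ 0 := by omega
      have hlt : n / 10 < f := by
        have hds : n / 10 < n := Nat.div_lt_self (Nat.pos_of_ne_zero hn) (by norm_num)
        omega
      have hmsb : pvDigitsMSB n = pvDigitsMSB (n / 10) ++ [n % 10] := by
        rw [pvDigitsMSB, pvDigitsMSB, if_neg hn, if_neg h0,
          Nat.digits_def' (b := 10) (by norm_num) (Nat.pos_of_ne_zero hn), List.reverse_cons]
      simp only [Nat.toDigitsCore]
      rw [if_neg h0, ih (n / 10) _ hlt, hmsb]
      simp

theorem pvToDigitsEq (n : Nat) : Nat.toDigits 10 n = (pvDigitsMSB n).map Nat.digitChar := by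
  unfold Nat.toDigits
  rw [pvToDigitsCoreEq (n + 1) n [] (by omega), List.append_nil]

theorem pvToCharsNonneg (n : Nat) : PySem.Int.toChars (n : Int) = (pvDigitsMSB n).map Nat.digitChar := by
  unfold PySem.Int.toChars
  rw [if_neg (by omega)]
  simpa using pvToDigitsEq n

theorem pvToCharsNeg (num : Int) (h : num < 0) :
    PySem.Int.toChars num = '-' :: (pvDigitsMSB num.natAbs).map Nat.digitChar := by
  unfold PySem.Int.toChars
  rw [if_pos h]
  simpa using pvToDigitsEq num.natAbs

-- reversed digit string: least significant digit first
theorem pvRevDCons (n : Nat) : ∃ L, (pvDigitsMSB n).reverse = n % 10 :: L ∧ (∀ x ∈ L, x < 10) ∧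
    (n ≠ 0 → n % 10 :: L = Nat.digits 10 n) := by
  by_cases hn : n = 0
  · exact ⟨[], by simp [hn, pvDigitsMSB], by simp, by simp [hn]⟩
  · refine ⟨Nat.digits 10 (n / 10), ?_, ?_, ?_⟩
    · rw [pvDigitsMSB, if_neg hn, List.reverse_reverse,
        Nat.digits_def' (by norm_num) (Nat.pos_of_ne_zero hn)]
    · intro x hx; exact Nat.digits_lt_base (by norm_num) hx
    · intro _; exact (Nat.digits_def' (by norm_num) (Nat.pos_of_ne_zero hn)).symm

theorem pvDigitCharZero (e : Nat) (h : e < 10) : (Nat.digitChar e = '0') ↔ e = 0 := by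
  interval_cases e <;> simp <;> decide

-- int(single digit char)
theorem pvIntChar (e : Nat) (h : e < 10) : (PySem.Int.ofChars? [Nat.digitChar e]).getD 0 = (e : Int) := by
  have := pvOfCharsDigits e [] h (by simp)
  simp only [List.map_cons, List.map_nil] at this
  rw [this]
  simp

-- the even-membership scan is the all-digits-odd test
theorem pvScanAEq (L : List Nat) (h : ∀ x ∈ L, x < 10) :
    pvScanA (L.map (fun (e : Nat) => (e : Int))) = L.all (fun e => decide (e % 2 = 1)) := by
  induction L with
  | nil => rfl
  | cons e L' ih =>
    have he : e < 10 := h e (by simp)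
    have hmem : ((e : Int) ∈ ([0, 2, 4, 6, 8] : List Int)) ↔ e % 2 = 0 := by
      interval_cases e <;> simp
    rw [List.map_cons, pvScanA, List.all_cons]
    by_cases hev : e % 2 = 0
    · rw [if_pos (hmem.2 hev)]
      simp [Nat.mod_two_ne_one.mpr hev]
    · rw [if_neg (fun hc => hev (hmem.1 hc))]
      have h1 : e % 2 = 1 := by omega
      simp [h1, ih (fun x hx => h x (by simp [hx]))]

-- decimal value of the reversed digit string
def pvRN (n : Nat) : Nat := (Nat.digits 10 n).foldl (fun x y => x * 10 + y) 0

theorem pvFoldlCast (L : List Nat) : ∀ a : Nat,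
    ((L.foldl (fun x y => x * 10 + y) a : Nat) : Int) = L.foldl (fun (x : Int) (y : Nat) => x * 10 + y) (a : Int) := by
  induction L with
  | nil => intro a; rfl
  | cons e L' ih => intro a; rw [List.foldl_cons, List.foldl_cons, ih]; push_cast; ring_nf

theorem pvRevLoopEq : ∀ (fuel m : Nat) (r : Int), m ≤ fuel →
    pvRevLoop fuel (m : Int) r = (Nat.digits 10 m).foldl (fun (x : Int) (y : Nat) => x * 10 + y) r := by
  intro fuel
  induction fuel with
  | zero =>
    intro m r h
    have : m = 0 := by omega
    subst this; simp [pvRevLoop]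
  | succ f ih =>
    intro m r h
    by_cases hm : m = 0
    · subst hm; simp [pvRevLoop]
    · have hpos : (0 : Int) < (m : Int) := by exact_mod_cast Nat.pos_of_ne_zero hm
      have hfd : PySem.Int.floordiv ((m : Int)) 10 = ((m / 10 : Nat) : Int) := by
        exact_mod_cast PySem.Int.floordiv_natCast m 10
      have hmd : PySem.Int.mod ((m : Int)) 10 = ((m % 10 : Nat) : Int) := by
        exact_mod_cast PySem.Int.mod_natCast m 10
      rw [pvRevLoop, if_pos hpos, hfd, hmd,
        Nat.digits_def' (b := 10) (by norm_num) (Nat.pos_of_ne_zero hm), List.foldl_cons]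
      exact ih (m / 10) _ (by
        have hds : m / 10 < m := Nat.div_lt_self (Nat.pos_of_ne_zero hm) (by norm_num); omega)

theorem pvOddLoopEq : ∀ (fuel m : Nat), m ≤ fuel →
    pvOddLoop fuel (m : Int) = (Nat.digits 10 m).all (fun e => decide (e % 2 = 1)) := by
  intro fuel
  induction fuel with
  | zero =>
    intro m h
    have : m = 0 := by omega
    subst this; simp [pvOddLoop]
  | succ f ih =>
    intro m h
    by_cases hm : m = 0
    · subst hm; simp [pvOddLoop]
    · have hpos : (0 : Int) < (m : Int) := by exact_mod_cast Nat.pos_of_ne_zero hm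
      have hfd : PySem.Int.floordiv ((m : Int)) 10 = ((m / 10 : Nat) : Int) := by
        exact_mod_cast PySem.Int.floordiv_natCast m 10
      have hmd : PySem.Int.mod ((m : Int)) 10 = ((m % 10 : Nat) : Int) := by
        exact_mod_cast PySem.Int.mod_natCast m 10
      have hmd2 : PySem.Int.mod (((m % 10 : Nat) : Int)) 2 = ((m % 10 % 2 : Nat) : Int) := by
        exact_mod_cast PySem.Int.mod_natCast (m % 10) 2
      rw [pvOddLoop, if_pos hpos, hmd, hmd2, hfd,
        Nat.digits_def' (b := 10) (by norm_num) (Nat.pos_of_ne_zero hm),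
        List.all_cons]
      by_cases hev : m % 10 % 2 = 0
      · rw [if_pos (by exact_mod_cast hev)]
        simp [hev]
      · rw [if_neg (by exact_mod_cast hev)]
        have h1 : m % 10 % 2 = 1 := by omega
        rw [ih (m / 10) (by
          have hds : m / 10 < m := Nat.div_lt_self (Nat.pos_of_ne_zero hm) (by norm_num); omega)]
        simp [h1]

-- A returns False whenever num % 10 == 0 (reversed string starts with '0')
theorem pvPortAZero (num : Int) (hz : PySem.Int.mod num 10 = 0) : is_reversible num = false := by
  have hdvd : (10 : Int) ∣ num := (PySem.Int.mod_eq_zero_iff_dvd num 10).1 hz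
  have habs : num.natAbs % 10 = 0 := by
    have : (10 : Nat) ∣ num.natAbs := Int.natAbs_dvd_natAbs.2 hdvd
    omega
  unfold is_reversible
  rw [PySem.List.slice?_none_none_neg_one, Option.getD_some]
  obtain ⟨L, hL, _, _⟩ := pvRevDCons num.natAbs
  by_cases hneg : num < 0
  · rw [pvToCharsNeg num hneg, List.reverse_cons, ← List.map_reverse, hL, habs]
    simp [Nat.digitChar]
  · have h0 : num = (num.natAbs : Int) := by omega
    rw [h0, pvToCharsNonneg, ← List.map_reverse, hL, habs]
    simp [Nat.digitChar]

-- full evaluation of port A on ↑n with n % 10 ≠ 0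
theorem pvPortAEval (n : Nat) (hnz : n % 10 ≠ 0) :
    is_reversible (n : Int) = (Nat.digits 10 (n + pvRN n)).all (fun e => decide (e % 2 = 1)) := by
  have hn0 : n ≠ 0 := fun h => hnz (by simp [h])
  unfold is_reversible
  rw [PySem.List.slice?_none_none_neg_one, Option.getD_some, pvToCharsNonneg, ← List.map_reverse]
  obtain ⟨L, hL, hLd, hdig⟩ := pvRevDCons n
  rw [hL]
  have hhead : Nat.digitChar (n % 10) ≠ '0' := by
    intro hc
    exact hnz ((pvDigitCharZero _ (Nat.mod_lt _ (by norm_num))).1 hc)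
  rw [List.map_cons, if_neg (by simp [hhead])]
  have hof := pvOfCharsDigits (n % 10) L (Nat.mod_lt _ (by norm_num)) hLd
  simp only [List.map_cons] at hof
  rw [hof]
  have hfold : (n % 10 :: L).foldl (fun x y => x * 10 + y) 0 = pvRN n := by
    rw [pvRN, ← hdig hn0]
  rw [hfold]
  change pvScanA (List.map (fun c => (PySem.Int.ofChars? [c]).getD 0)
    (PySem.Int.toChars ((n : Int) + ((pvRN n : Nat) : Int)))) = _
  have htot : (n : Int) + (pvRN n : Int) = ((n + pvRN n : Nat) : Int) := by push_cast; ring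
  rw [htot, pvToCharsNonneg]
  have hT : n + pvRN n ≠ 0 := by omega
  have hmsb : pvDigitsMSB (n + pvRN n) = (Nat.digits 10 (n + pvRN n)).reverse := by
    rw [pvDigitsMSB, if_neg hT]
  rw [hmsb, List.map_map]
  have hmm : List.map ((fun c => (PySem.Int.ofChars? [c]).getD 0) ∘ Nat.digitChar)
        (Nat.digits 10 (n + pvRN n)).reverse
      = List.map (fun (e : Nat) => (e : Int)) (Nat.digits 10 (n + pvRN n)).reverse :=
    List.map_congr_left (fun e he =>
      pvIntChar e (Nat.digits_lt_base (by norm_num) (List.mem_reverse.1 he)))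
  rw [hmm, pvScanAEq _ (fun x hx => Nat.digits_lt_base (by norm_num) (List.mem_reverse.1 hx)),
    List.all_reverse]

-- full evaluation of port B on ↑n with n % 10 ≠ 0
theorem pvPortBEval (n : Nat) (hnz : n % 10 ≠ 0) :
    is_reversible_alt (n : Int) = (Nat.digits 10 (n + pvRN n)).all (fun e => decide (e % 2 = 1)) := by
  unfold is_reversible_alt
  have hmd : PySem.Int.mod ((n : Int)) 10 = ((n % 10 : Nat) : Int) := by
    exact_mod_cast PySem.Int.mod_natCast n 10
  rw [hmd, if_neg (by exact_mod_cast hnz)]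
  have hr : pvRevLoop (n : Int).toNat (n : Int) 0 = ((pvRN n : Nat) : Int) := by
    rw [Int.toNat_natCast, pvRevLoopEq n n 0 le_rfl, pvRN, pvFoldlCast]
    norm_num
  rw [hr]
  change pvOddLoop ((n : Int) + ((pvRN n : Nat) : Int)).toNat ((n : Int) + ((pvRN n : Nat) : Int)) = _
  have htot : (n : Int) + (pvRN n : Int) = ((n + pvRN n : Nat) : Int) := by push_cast; ring
  rw [htot, Int.toNat_natCast]
  exact pvOddLoopEq _ _ le_rfl

-- ===== VERDICT (by name: the statement is the Claim_ definition above) =====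
theorem is_reversible_spec : Claim_equal_is_reversible := by
  unfold Claim_equal_is_reversible Spec_is_reversible
  intro num _hdom hpre
  by_cases hz : PySem.Int.mod num 10 = 0
  · rw [pvPortAZero num hz]
    unfold is_reversible_alt
    rw [if_pos hz]
  · have hnn : 0 ≤ num := by
      rcases hpre with h | h
      · exact h
      · exact absurd ((PySem.Int.mod_eq_zero_iff_dvd num 10).2 h) hz
    have h0 : num = (num.toNat : Int) := by omega
    have hnz : num.toNat % 10 ≠ 0 := by
      intro hc
      apply hz
      rw [h0]
      have hmd : PySem.Int.mod ((num.toNat : Int)) 10 = ((num.toNat % 10 : Nat) : Int) := by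
        exact_mod_cast PySem.Int.mod_natCast num.toNat 10
      rw [hmd, hc]
      rfl
    rw [h0, pvPortAEval _ hnz, pvPortBEval _ hnz]
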